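-- pv_equiv track=rewrite | github.com/charlesnpx/keyframe | keyframe/dedupe.py | has_differing_evidence
-- ===== SOURCE A (Python) =====
-- STATUS_TOKENS = {
--     "approved",
--     "approve",
--     "complete",
--     "completed",
--     "confirmed",
--     "draft",
--     "pending",
--     "rejected",
--     "submitted",
-- }
--
-- def evidence_markers(tokens: set[str]) -> dict[str, set[str]]:
--     """Extract page/status/option markers used as conservative merge vetoes."""
--     page = {t for t in tokens if t == "page" or t.startswith("page")}
--     option = {t for t in tokens if t == "option" or t.startswith("option")}
--     section = {t for t in tokens if t == "section" or t.startswith("section")}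
--     status = tokens & STATUS_TOKENS
--     numeric_pages = set()
--     if "page" in tokens:
--         numeric_pages = {t for t in tokens if t.isdigit() or "/" in t}
--     return {
--         "page": page | numeric_pages,
--         "option": option,
--         "section": section,
--         "status": status,
--     }
--
-- def has_differing_evidence(tokens_a: set[str], tokens_b: set[str]) -> bool:
--     markers_a = evidence_markers(tokens_a)
--     markers_b = evidence_markers(tokens_b)
--     for key in ("page", "option", "section", "status"):
--         a = markers_a[key]
--         b = markers_b[key]
--         if a and b and a != b:
--             return True
--     return False
-- ===== SOURCE B (Python) =====
-- STATUS_TOKENS = {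
--     "approved",
--     "approve",
--     "complete",
--     "completed",
--     "confirmed",
--     "draft",
--     "pending",
--     "rejected",
--     "submitted",
-- }
--
-- def _in_bucket(key, t, has_page):
--     """Does token t belong to the marker bucket for `key` (given whether 'page' is present)?"""
--     if key == "status":
--         return t in STATUS_TOKENS
--     if t.startswith(key):
--         return True
--     return key == "page" and has_page and (t.isdigit() or "/" in t)
--
-- def _conflict(key, ta, hpa, tb, hpb):
--     # conflict = both sides have a token in this bucket AND some token is in the
--     # bucket on one side but not the other (a symmetric-difference witness).
--     if not any(_in_bucket(key, t, hpa) for t in ta):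
--         return False
--     if not any(_in_bucket(key, t, hpb) for t in tb):
--         return False
--     return (any(_in_bucket(key, t, hpa) and not (t in tb and _in_bucket(key, t, hpb)) for t in ta)
--             or any(_in_bucket(key, t, hpb) and not (t in ta and _in_bucket(key, t, hpa)) for t in tb))
--
-- def has_differing_evidence(tokens_a: set[str], tokens_b: set[str]) -> bool:
--     hpa = "page" in tokens_a
--     hpb = "page" in tokens_b
--     return any(_conflict(key, tokens_a, hpa, tokens_b, hpb)
--                for key in ("page", "option", "section", "status"))
-- ===== Notes on version B (the rewrite author's own statement) =====
-- stated objective: alternative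
-- what changed: B never materialises the four marker sets: a single membership predicate classifies a token into a bucket on demand, and for each key it decides the conflict by short-circuit existential scans (nonempty on both sides, then search for a symmetric-difference witness token classified into the bucket on one side but not the other), instead of building sets and comparing them for equality.
import Mathlib
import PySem

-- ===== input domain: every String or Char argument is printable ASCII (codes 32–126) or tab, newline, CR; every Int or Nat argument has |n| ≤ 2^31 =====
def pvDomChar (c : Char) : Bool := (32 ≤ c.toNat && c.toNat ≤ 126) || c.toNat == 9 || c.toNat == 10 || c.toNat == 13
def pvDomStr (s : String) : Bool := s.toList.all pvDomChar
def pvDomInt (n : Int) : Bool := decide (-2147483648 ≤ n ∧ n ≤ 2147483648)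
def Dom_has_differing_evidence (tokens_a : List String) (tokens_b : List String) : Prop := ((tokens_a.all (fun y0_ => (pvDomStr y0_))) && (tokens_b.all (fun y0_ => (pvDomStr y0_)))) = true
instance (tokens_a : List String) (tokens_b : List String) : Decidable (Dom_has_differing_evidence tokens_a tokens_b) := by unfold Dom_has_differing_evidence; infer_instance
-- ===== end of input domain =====

-- B avoids building the marker sets: a membership predicate classifies tokens on demand and each
-- key's conflict is decided by existential scans for a symmetric-difference witness (objective:
-- alternative algorithm, same cost). Sets are compared as sets; order/duplicates do not matter.

def STATUS_TOKENS : List String :=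
  ["approved", "approve", "complete", "completed", "confirmed", "draft", "pending", "rejected", "submitted"]

-- ===== PORT A =====
def evidence_markers (tokens : List String) : PySem.Dict String (PySem.Set String) :=
  let page := tokens.filter (fun t => t == "page" || PySem.Str.startswith t "page")
  let option := tokens.filter (fun t => t == "option" || PySem.Str.startswith t "option")
  let sect := tokens.filter (fun t => t == "section" || PySem.Str.startswith t "section")
  let status := PySem.Set.inter tokens STATUS_TOKENS
  let numeric_pages :=
    if tokens.contains "page" then
      tokens.filter (fun t => PySem.Str.strIsdigit t || PySem.Str.isIn "/" t)
    else []
  (((((PySem.Dict.empty.insert "page" (PySem.Set.union page numeric_pages)).insert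
      "option" option).insert "section" sect).insert "status" status))

def has_differing_evidence (tokens_a : List String) (tokens_b : List String) : Bool :=
  let markers_a := evidence_markers tokens_a
  let markers_b := evidence_markers tokens_b
  ["page", "option", "section", "status"].any (fun key =>
    let a := PySem.Dict.getD markers_a key []
    let b := PySem.Dict.getD markers_b key []
    !a.isEmpty && !b.isEmpty && !(PySem.Set.equal a b))

-- ===== PORT B =====
def inBucket (key : String) (t : String) (has_page : Bool) : Bool :=
  if key == "status" then STATUS_TOKENS.contains t
  else if PySem.Str.startswith t key then true
  else key == "page" && has_page && (PySem.Str.strIsdigit t || PySem.Str.isIn "/" t)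

def conflictKey (key : String) (ta : List String) (hpa : Bool) (tb : List String) (hpb : Bool) : Bool :=
  if !(ta.any fun t => inBucket key t hpa) then false
  else if !(tb.any fun t => inBucket key t hpb) then false
  else
    (ta.any fun t => inBucket key t hpa && !(tb.contains t && inBucket key t hpb)) ||
    (tb.any fun t => inBucket key t hpb && !(ta.contains t && inBucket key t hpa))

def has_differing_evidence_alt (tokens_a : List String) (tokens_b : List String) : Bool :=
  let hpa := tokens_a.contains "page"
  let hpb := tokens_b.contains "page"
  ["page", "option", "section", "status"].any (fun key =>
    conflictKey key tokens_a hpa tokens_b hpb)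

-- ===== PRECONDITION & SPEC =====
def Spec_has_differing_evidence (tokens_a : List String) (tokens_b : List String) (out : Bool) : Prop := out = has_differing_evidence_alt tokens_a tokens_b
instance (tokens_a : List String) (tokens_b : List String) (out : Bool) : Decidable (Spec_has_differing_evidence tokens_a tokens_b out) := by unfold Spec_has_differing_evidence; infer_instance

-- ===== CLAIM (what is proved, stated in full; the proofs are below) =====
def Claim_equal_has_differing_evidence : Prop := ∀ (tokens_a : List String) (tokens_b : List String), Dom_has_differing_evidence tokens_a tokens_b → Spec_has_differing_evidence tokens_a tokens_b (has_differing_evidence tokens_a tokens_b)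

-- ===== LEMMAS AND PROOFS =====

-- the combined page predicate (prefix "page", or numeric/slash token when "page" is present)
def pagePred (hp : Bool) (t : String) : Bool :=
  PySem.Str.startswith t "page" || (hp && (PySem.Str.strIsdigit t || PySem.Str.isIn "/" t))

-- membership characterisation of A's four marker sets
theorem markers_page_mem (tk : List String) (x : String) :
    x ∈ PySem.Dict.getD (evidence_markers tk) "page" [] ↔
      x ∈ tk ∧ pagePred (tk.contains "page") x = true := by
  simp [evidence_markers, PySem.Dict.getD_insert, PySem.Set.mem_union,
    List.mem_filter, pagePred]
  have hpg : x = "page" → PySem.Chars.startswith x.toList ['p', 'a', 'g', 'e'] = true :=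
    fun h => by subst h; decide
  tauto

theorem markers_option_mem (tk : List String) (x : String) :
    x ∈ PySem.Dict.getD (evidence_markers tk) "option" [] ↔
      x ∈ tk ∧ PySem.Str.startswith x "option" = true := by
  simp [evidence_markers, PySem.Dict.getD_insert, List.mem_filter]
  exact fun _ h => by subst h; decide

theorem markers_section_mem (tk : List String) (x : String) :
    x ∈ PySem.Dict.getD (evidence_markers tk) "section" [] ↔
      x ∈ tk ∧ PySem.Str.startswith x "section" = true := by
  simp [evidence_markers, PySem.Dict.getD_insert, List.mem_filter]
  exact fun _ h => by subst h; decide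

theorem markers_status_mem (tk : List String) (x : String) :
    x ∈ PySem.Dict.getD (evidence_markers tk) "status" [] ↔
      x ∈ tk ∧ x ∈ STATUS_TOKENS := by
  simp [evidence_markers, PySem.Set.mem_inter]

-- the bucket predicate at each of the four literal keys
theorem inBucket_page (t : String) (hp : Bool) : inBucket "page" t hp = pagePred hp t := by
  simp only [inBucket, pagePred]
  have : ("page" == "status") = false := by decide
  rw [this]
  by_cases h : PySem.Str.startswith t "page" = true <;> simp_all

theorem inBucket_option (t : String) (hp : Bool) :
    inBucket "option" t hp = PySem.Str.startswith t "option" := by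
  simp only [inBucket]
  have h1 : ("option" == "status") = false := by decide
  have h2 : ("option" == "page") = false := by decide
  rw [h1, h2]
  by_cases h : PySem.Str.startswith t "option" = true <;> simp_all

theorem inBucket_section (t : String) (hp : Bool) :
    inBucket "section" t hp = PySem.Str.startswith t "section" := by
  simp only [inBucket]
  have h1 : ("section" == "status") = false := by decide
  have h2 : ("section" == "page") = false := by decide
  rw [h1, h2]
  by_cases h : PySem.Str.startswith t "section" = true <;> simp_all

theorem inBucket_status (t : String) (hp : Bool) :
    inBucket "status" t hp = STATUS_TOKENS.contains t := by
  simp [inBucket]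

-- core lemma: A's set-based conflict test equals B's existential scans, given
-- membership characterisations of the two marker sets by predicates over the token lists
theorem scan_eq {a b : PySem.Set String} {ta tb : List String} {P Q : String → Bool}
    (hA : ∀ x, x ∈ a ↔ x ∈ ta ∧ P x = true)
    (hB : ∀ x, x ∈ b ↔ x ∈ tb ∧ Q x = true) :
    (!a.isEmpty && !b.isEmpty && !(PySem.Set.equal a b))
      = (if !(ta.any P) then false
         else if !(tb.any Q) then false
         else
           (ta.any fun t => P t && !(tb.contains t && Q t)) ||
           (tb.any fun t => Q t && !(ta.contains t && P t))) := by
  have ea : a.isEmpty = !(ta.any P) := by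
    rw [Bool.eq_iff_iff]
    simp only [List.isEmpty_iff, List.eq_nil_iff_forall_not_mem, Bool.not_eq_true',
      List.any_eq_false]
    constructor
    · intro h x hx hp; exact h x ((hA x).mpr ⟨hx, hp⟩)
    · intro h x hx; obtain ⟨h1, h2⟩ := (hA x).mp hx; exact absurd h2 (by simp [h x h1])
  have eb : b.isEmpty = !(tb.any Q) := by
    rw [Bool.eq_iff_iff]
    simp only [List.isEmpty_iff, List.eq_nil_iff_forall_not_mem, Bool.not_eq_true',
      List.any_eq_false]
    constructor
    · intro h x hx hp; exact h x ((hB x).mpr ⟨hx, hp⟩)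
    · intro h x hx; obtain ⟨h1, h2⟩ := (hB x).mp hx; exact absurd h2 (by simp [h x h1])
  have ene : (!(PySem.Set.equal a b))
      = ((ta.any fun t => P t && !(tb.contains t && Q t)) ||
         (tb.any fun t => Q t && !(ta.contains t && P t))) := by
    rw [Bool.eq_iff_iff]
    constructor
    · intro h
      have hne : ¬ ∀ x : String, x ∈ a ↔ x ∈ b := by
        intro hall
        rw [(PySem.Set.equal_iff a b).mpr hall] at h
        simp at h
      obtain ⟨x, hx⟩ := not_forall.mp hne
      rw [Bool.or_eq_true]
      by_cases hxa : x ∈ a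
      · have hxb : x ∉ b := fun hb => hx (iff_of_true hxa hb)
        obtain ⟨h1, h2⟩ := (hA x).mp hxa
        refine Or.inl (List.any_eq_true.mpr ⟨x, h1, ?_⟩)
        simp only [h2, Bool.true_and, Bool.not_eq_true']
        simp only [Bool.and_eq_false_iff, List.contains_eq_mem, decide_eq_false_iff_not]
        by_cases hm : x ∈ tb
        · refine Or.inr ?_
          cases hq : Q x
          · rfl
          · exact absurd ((hB x).mpr ⟨hm, hq⟩) hxb
        · simp [hm]
      · have hxb : x ∈ b := by
          by_contra hb; exact hx (iff_of_false hxa hb)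
        obtain ⟨h1, h2⟩ := (hB x).mp hxb
        refine Or.inr (List.any_eq_true.mpr ⟨x, h1, ?_⟩)
        simp only [h2, Bool.true_and, Bool.not_eq_true']
        simp only [Bool.and_eq_false_iff, List.contains_eq_mem, decide_eq_false_iff_not]
        by_cases hm : x ∈ ta
        · refine Or.inr ?_
          cases hq : P x
          · rfl
          · exact absurd ((hA x).mpr ⟨hm, hq⟩) hxa
        · simp [hm]
    · intro h
      rw [Bool.not_eq_true']
      rw [Bool.eq_false_iff]
      intro heq
      have hall := (PySem.Set.equal_iff a b).mp heq
      rw [Bool.or_eq_true] at h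
      rcases h with h | h
      · obtain ⟨x, hm, hx⟩ := List.any_eq_true.mp h
        rw [Bool.and_eq_true, Bool.not_eq_true'] at hx
        obtain ⟨hp, hnq⟩ := hx
        have hxa : x ∈ a := (hA x).mpr ⟨hm, hp⟩
        obtain ⟨hm2, hq2⟩ := (hB x).mp ((hall x).mp hxa)
        rw [List.contains_eq_mem] at hnq
        simp [hm2, hq2] at hnq
      · obtain ⟨x, hm, hx⟩ := List.any_eq_true.mp h
        rw [Bool.and_eq_true, Bool.not_eq_true'] at hx
        obtain ⟨hp, hnq⟩ := hx
        have hxb : x ∈ b := (hB x).mpr ⟨hm, hp⟩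
        obtain ⟨hm2, hq2⟩ := (hA x).mp ((hall x).mpr hxb)
        rw [List.contains_eq_mem] at hnq
        simp [hm2, hq2] at hnq
  rw [ea, eb, ene]
  by_cases h1 : ta.any P <;> by_cases h2 : tb.any Q <;> simp [h1, h2]

-- ===== VERDICT (by name: the statement is the Claim_ definition above) =====
theorem has_differing_evidence_spec : Claim_equal_has_differing_evidence := by
  intro tokens_a tokens_b _
  unfold Spec_has_differing_evidence
  show has_differing_evidence tokens_a tokens_b = has_differing_evidence_alt tokens_a tokens_b
  simp only [has_differing_evidence, has_differing_evidence_alt,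
    List.any_cons, List.any_nil, Bool.or_false]
  congr 1
  · rw [conflictKey]
    simp only [inBucket_page]
    exact scan_eq (fun x => markers_page_mem tokens_a x) (fun x => markers_page_mem tokens_b x)
  congr 1
  · rw [conflictKey]
    simp only [inBucket_option]
    exact scan_eq (fun x => markers_option_mem tokens_a x) (fun x => markers_option_mem tokens_b x)
  congr 1
  · rw [conflictKey]
    simp only [inBucket_section]
    exact scan_eq (fun x => markers_section_mem tokens_a x) (fun x => markers_section_mem tokens_b x)
  · rw [conflictKey]
    simp only [inBucket_status]
    exact scan_eq (P := fun t => STATUS_TOKENS.contains t) (Q := fun t => STATUS_TOKENS.contains t)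
      (fun x => by rw [markers_status_mem]; simp)
      (fun x => by rw [markers_status_mem]; simp)
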